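-- pv_equiv track=rewrite | github.com/Micromeda/pygenprop | modules/lib.py | collapse_step_evidence_and_gene_ontologys
-- ===== SOURCE A (Python) =====
-- def collapse_step_evidence_and_gene_ontologys(genome_property_record):
--     """
--     Pile up multiple consecutive 'EV' and 'TG' pairs to a single set of 'EV' and 'TG' pairs.
--     Example:
--         EV  C1
--         TG  C2  ==== Goes To ====>> EV C1; C3;
--         EV  C3                      TG C2; C4;
--         EV  C4
--     :param genome_property_record: A list of marker, content tuples representing genome property flat file lines.
--     :return:    A list of reduced redundancy markers, content tuples representing genome property flat file lines.
--                 Inside steps, multiple 'EV' and 'TG' markers are piled up to two markers. See above for final layout.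
--
--     TODO:   There may be an issue with this and the sufficient key word. The sufficient key word may be only for one
--             piece of evidence only.
--     """
--     current_evidence = []
--     current_go_terms = []
--     final_genome_property_record = []
--     for marker, content in genome_property_record:
--         if marker == '--':
--             if current_evidence:
--                 final_genome_property_record.append(('EV', ' '.join(current_evidence)))
--                 current_evidence = []
--             if current_go_terms:
--                 final_genome_property_record.append(('TG', ' '.join(current_go_terms)))
--                 current_go_terms = []
--             final_genome_property_record.append(('--', ''))
--         else:
--             if marker == 'EV':
--                 current_evidence.append(content)
--             elif marker == 'TG':
--                 current_go_terms.append(content)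
--             else:
--                 final_genome_property_record.append((marker, content))
--
--     return final_genome_property_record
-- ===== SOURCE B (Python) =====
-- def _flush_segment(segment):
--     """Collapsed lines for one '--'-terminated segment: non-EV/TG lines in order, then grouped EV, then grouped TG."""
--     evs = [content for marker, content in segment if marker == 'EV']
--     tgs = [content for marker, content in segment if marker == 'TG']
--     lines = [(marker, content) for marker, content in segment if marker not in ('EV', 'TG')]
--     if evs:
--         lines.append(('EV', ' '.join(evs)))
--     if tgs:
--         lines.append(('TG', ' '.join(tgs)))
--     return lines
--
--
-- def collapse_step_evidence_and_gene_ontologys(genome_property_record):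
--     out = []
--     segment = []
--     for pair in genome_property_record:
--         if pair[0] == '--':
--             out.extend(_flush_segment(segment))
--             out.append(('--', ''))
--             segment = []
--         else:
--             segment.append(pair)
--     # trailing segment (no '--'): EV/TG collected there are never flushed by the format
--     out.extend(p for p in segment if p[0] not in ('EV', 'TG'))
--     return out
-- ===== Notes on version B (the rewrite author's own statement) =====
-- stated objective: alternative
-- what changed: B replaces A's three running accumulators (evidence, go-terms, output) with a segment-based decomposition: the record is cut at each '--' marker and every completed segment is flushed by a helper that emits its non-EV/TG lines followed by the grouped EV and TG lines, while the trailing unterminated segment emits only its non-EV/TG lines.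
import Mathlib
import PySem

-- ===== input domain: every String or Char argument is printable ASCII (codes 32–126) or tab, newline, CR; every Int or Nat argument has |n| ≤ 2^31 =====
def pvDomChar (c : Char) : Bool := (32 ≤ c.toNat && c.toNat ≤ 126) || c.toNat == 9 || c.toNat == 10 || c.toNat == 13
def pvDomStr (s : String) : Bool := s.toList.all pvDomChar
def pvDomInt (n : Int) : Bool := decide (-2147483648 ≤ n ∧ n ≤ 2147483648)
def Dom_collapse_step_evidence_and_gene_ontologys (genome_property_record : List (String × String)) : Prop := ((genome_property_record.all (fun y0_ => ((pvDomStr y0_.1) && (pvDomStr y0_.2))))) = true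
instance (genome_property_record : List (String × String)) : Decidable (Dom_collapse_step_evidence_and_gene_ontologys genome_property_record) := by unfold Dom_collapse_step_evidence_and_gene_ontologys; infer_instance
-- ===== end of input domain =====

-- B replaces A's three running accumulators by a segment-based decomposition (cut at '--',
-- flush each completed segment with a helper); alternative structure, same cost.

-- ===== PORT A =====
-- one loop iteration of A: state = (current_evidence, current_go_terms, final_genome_property_record)
def pvStepA (st : List String × List String × List (String × String)) (p : String × String) :
    List String × List String × List (String × String) :=
  if p.1 == "--" then
    let out1 := if st.1 ≠ [] then st.2.2 ++ [("EV", PySem.Str.join " " st.1)] else st.2.2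
    let out2 := if st.2.1 ≠ [] then out1 ++ [("TG", PySem.Str.join " " st.2.1)] else out1
    ([], [], out2 ++ [("--", "")])
  else if p.1 == "EV" then (st.1 ++ [p.2], st.2.1, st.2.2)
  else if p.1 == "TG" then (st.1, st.2.1 ++ [p.2], st.2.2)
  else (st.1, st.2.1, st.2.2 ++ [p])

def collapse_step_evidence_and_gene_ontologys (genome_property_record : List (String × String)) : List (String × String) :=
  (genome_property_record.foldl pvStepA ([], [], [])).2.2

-- ===== PORT B =====
-- helper _flush_segment of Source B
def pvFlushSegment (segment : List (String × String)) : List (String × String) :=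
  let evs := (segment.filter (fun p => p.1 == "EV")).map Prod.snd
  let tgs := (segment.filter (fun p => p.1 == "TG")).map Prod.snd
  let lines := segment.filter (fun p => p.1 != "EV" && p.1 != "TG")
  let lines := if evs.isEmpty then lines else lines ++ [("EV", PySem.Str.join " " evs)]
  if tgs.isEmpty then lines else lines ++ [("TG", PySem.Str.join " " tgs)]

-- one loop iteration of B: state = (out, segment)
def pvStepB (st : List (String × String) × List (String × String)) (p : String × String) :
    List (String × String) × List (String × String) :=
  if p.1 == "--" then (st.1 ++ pvFlushSegment st.2 ++ [("--", "")], [])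
  else (st.1, st.2 ++ [p])

def collapse_step_evidence_and_gene_ontologys_alt (genome_property_record : List (String × String)) : List (String × String) :=
  let st := genome_property_record.foldl pvStepB ([], [])
  st.1 ++ st.2.filter (fun p => p.1 != "EV" && p.1 != "TG")

-- ===== PRECONDITION & SPEC =====
def Spec_collapse_step_evidence_and_gene_ontologys (genome_property_record : List (String × String)) (out : List (String × String)) : Prop := out = collapse_step_evidence_and_gene_ontologys_alt genome_property_record
instance (genome_property_record : List (String × String)) (out : List (String × String)) : Decidable (Spec_collapse_step_evidence_and_gene_ontologys genome_property_record out) := by unfold Spec_collapse_step_evidence_and_gene_ontologys; infer_instance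

-- ===== CLAIM (what is proved, stated in full; the proofs are below) =====
def Claim_equal_collapse_step_evidence_and_gene_ontologys : Prop := ∀ (genome_property_record : List (String × String)), Dom_collapse_step_evidence_and_gene_ontologys genome_property_record → Spec_collapse_step_evidence_and_gene_ontologys genome_property_record (collapse_step_evidence_and_gene_ontologys genome_property_record)

-- ===== LEMMAS AND PROOFS =====
-- the three projections of a segment used by the invariant
def pvEvs (seg : List (String × String)) : List String := (seg.filter (fun p => p.1 == "EV")).map Prod.snd
def pvTgs (seg : List (String × String)) : List String := (seg.filter (fun p => p.1 == "TG")).map Prod.snd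
def pvOther (seg : List (String × String)) : List (String × String) := seg.filter (fun p => p.1 != "EV" && p.1 != "TG")

theorem pvFlush_eq (seg : List (String × String)) :
    pvFlushSegment seg =
      (pvOther seg ++ (if pvEvs seg = [] then [] else [("EV", PySem.Str.join " " (pvEvs seg))]))
        ++ (if pvTgs seg = [] then [] else [("TG", PySem.Str.join " " (pvTgs seg))]) := by
  simp only [pvFlushSegment, pvEvs, pvTgs, pvOther, List.isEmpty_iff]
  split_ifs <;> simp_all

-- main invariant: running A's loop from a state matching segment `seg` equals
-- running B's loop from (out, seg) and finishing.
theorem pvLoop_eq (r : List (String × String)) :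
    ∀ (out seg : List (String × String)),
      (r.foldl pvStepA (pvEvs seg, pvTgs seg, out ++ pvOther seg)).2.2 =
        (r.foldl pvStepB (out, seg)).1 ++ pvOther (r.foldl pvStepB (out, seg)).2 := by
  induction r with
  | nil => intro out seg; simp
  | cons p rest ih =>
    intro out seg
    simp only [List.foldl_cons]
    by_cases hdd : p.1 == "--"
    · have h1 : pvStepA (pvEvs seg, pvTgs seg, out ++ pvOther seg) p =
          (pvEvs [], pvTgs [], (out ++ pvFlushSegment seg ++ [("--", "")]) ++ pvOther []) := by
        simp [pvStepA, hdd, pvFlush_eq, pvEvs, pvTgs, pvOther]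
        split_ifs <;> simp
      have h2 : pvStepB (out, seg) p = (out ++ pvFlushSegment seg ++ [("--", "")], []) := by
        simp [pvStepB, hdd]
      rw [h1, h2, ih]
    · have h2 : pvStepB (out, seg) p = (out, seg ++ [p]) := by simp [pvStepB, hdd]
      have hev : pvEvs (seg ++ [p]) = pvEvs seg ++ (if p.1 == "EV" then [p.2] else []) := by
        simp [pvEvs, List.filter_append]; split_ifs <;> simp_all
      have htg : pvTgs (seg ++ [p]) = pvTgs seg ++ (if p.1 == "TG" then [p.2] else []) := by
        simp [pvTgs, List.filter_append]; split_ifs <;> simp_all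
      have hot : pvOther (seg ++ [p]) = pvOther seg ++ (if p.1 == "EV" || p.1 == "TG" then [] else [p]) := by
        simp only [pvOther, List.filter_append]
        by_cases h1 : p.1 = "EV" <;> by_cases h2' : p.1 = "TG" <;> simp_all
      have h1 : pvStepA (pvEvs seg, pvTgs seg, out ++ pvOther seg) p =
          (pvEvs (seg ++ [p]), pvTgs (seg ++ [p]), out ++ pvOther (seg ++ [p])) := by
        rw [hev, htg, hot]; unfold pvStepA
        by_cases hE : p.1 = "EV" <;> by_cases hT : p.1 = "TG" <;> simp_all
      rw [h1, h2, ih]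

-- ===== VERDICT (by name: the statement is the Claim_ definition above) =====
theorem collapse_step_evidence_and_gene_ontologys_spec : Claim_equal_collapse_step_evidence_and_gene_ontologys := by
  intro r _
  unfold Spec_collapse_step_evidence_and_gene_ontologys collapse_step_evidence_and_gene_ontologys
    collapse_step_evidence_and_gene_ontologys_alt
  have := pvLoop_eq r [] []
  simpa [pvEvs, pvTgs, pvOther] using this
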